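-- pv_equiv track=rewrite | github.com/WangLin1126/MetaRuleGPT | dataset.py | compute_mid_result
-- ===== SOURCE A (Python) =====
-- base_data = ['A','B','C','D','E','F','G','H','I','J','K','L','M','N','O','P','Q','R','S','T','U','V','W','X','Y','Z','a','b','c','d','e','f','g','h','i','j','k','l','m','n','o','p','q','r','s','t','u','v','w','x','y','z']
--
-- def compute_mid_result(my_list):
--     my_list = [3 if x == 2 else x for x in my_list]
--     total = sum(my_list) + len(my_list) - 1
--     source = []
--     target = []
--
--     for i in range(total):
--         source += [base_data[i]]
--     source = ['&'] + source
--     Sum = 0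
--     for i in range(len(my_list) - 1):
--         Sum += my_list[i] + 1
--         source[Sum] = '&'
--
--     source[0] = 's'
--
--     return source
-- ===== SOURCE B (Python) =====
-- base_data = ['A','B','C','D','E','F','G','H','I','J','K','L','M','N','O','P','Q','R','S','T','U','V','W','X','Y','Z','a','b','c','d','e','f','g','h','i','j','k','l','m','n','o','p','q','r','s','t','u','v','w','x','y','z']
--
-- def compute_mid_result(my_list):
--     vals = [3 if x == 2 else x for x in my_list]
--     result = ['s']
--     j = 0
--     for v in vals[:-1]:
--         for _ in range(v):
--             result.append(base_data[j])
--             j += 1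
--         result.append('&')
--         j += 1
--     if vals:
--         for _ in range(vals[-1]):
--             result.append(base_data[j])
--             j += 1
--     return result
-- ===== Notes on version B (the rewrite author's own statement) =====
-- stated objective: simpler
-- what changed: Instead of filling a flat letter list and then overwriting positions at running offsets with '&' (two passes plus an index-arithmetic pass), B builds the result in one pass, emitting each segment's letters directly and a '&' after every non-final segment.
-- outside the precondition, e.g. on compute_mid_result([-1, 1]): A returns ['s', 'A'], B returns ['s', '&', 'B']
import Mathlib
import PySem

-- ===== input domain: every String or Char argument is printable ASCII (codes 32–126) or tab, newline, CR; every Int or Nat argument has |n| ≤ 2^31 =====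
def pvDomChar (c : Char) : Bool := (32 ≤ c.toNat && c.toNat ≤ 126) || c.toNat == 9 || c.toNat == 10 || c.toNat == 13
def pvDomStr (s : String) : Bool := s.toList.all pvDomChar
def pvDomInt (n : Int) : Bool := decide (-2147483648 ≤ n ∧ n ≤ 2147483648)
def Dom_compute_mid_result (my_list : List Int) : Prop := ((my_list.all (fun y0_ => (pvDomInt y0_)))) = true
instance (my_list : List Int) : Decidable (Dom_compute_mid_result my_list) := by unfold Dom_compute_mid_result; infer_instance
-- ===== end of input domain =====

-- B builds the same output in one incremental pass (letters of each segment, then a '&'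
-- after every non-final segment) instead of A's fill-then-overwrite with running offsets.

def base_data : List String :=
  ["A","B","C","D","E","F","G","H","I","J","K","L","M",
   "N","O","P","Q","R","S","T","U","V","W","X","Y","Z",
   "a","b","c","d","e","f","g","h","i","j","k","l","m",
   "n","o","p","q","r","s","t","u","v","w","x","y","z"]

-- ===== PORT A =====
def compute_mid_result (my_list : List Int) : List String :=
  let ml := my_list.map (fun x => if x = 2 then (3 : Int) else x)
  let total : Int := ml.sum + ml.length - 1
  let source : List String :=
    (PySem.List.pyRange 0 total 1).foldl
      (fun s i => s ++ [PySem.List.pyGetD base_data i ""]) []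
  let source := "&" :: source
  let p :=
    (PySem.List.pyRange 0 ((ml.length : Int) - 1) 1).foldl
      (fun (p : List String × Int) i =>
        let Sum := p.2 + PySem.List.pyGetD ml i 0 + 1
        (PySem.List.pySetD p.1 Sum "&", Sum))
      (source, 0)
  PySem.List.pySetD p.1 0 "s"

-- ===== PORT B =====
def compute_mid_result_alt (my_list : List Int) : List String :=
  let vals := my_list.map (fun x => if x = 2 then (3 : Int) else x)
  let p :=
    (PySem.List.slice vals none (some (-1))).foldl
      (fun (q : List String × Int) v =>
        let r :=
          (PySem.List.pyRange 0 v 1).foldl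
            (fun (w : List String × Int) _ =>
              (w.1 ++ [PySem.List.pyGetD base_data w.2 ""], w.2 + 1)) q
        (r.1 ++ ["&"], r.2 + 1))
      (["s"], (0 : Int))
  if vals = [] then p.1
  else
    ((PySem.List.pyRange 0 (PySem.List.pyGetD vals (-1) 0) 1).foldl
      (fun (w : List String × Int) _ =>
        (w.1 ++ [PySem.List.pyGetD base_data w.2 ""], w.2 + 1)) p).1

-- ===== PRECONDITION & SPEC =====
-- Pre_ excludes (a) lists with a negative element, where A's '&' goes to a position computed
-- from a negative running offset (a Python negative-index wraparound artefact), and (b) lists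
-- whose mapped total sum + len - 1 exceeds the 52-letter alphabet, where A raises IndexError.
def Pre_compute_mid_result (my_list : List Int) : Prop :=
  (∀ x ∈ my_list, 0 ≤ x) ∧
  (my_list.map (fun x => if x = 2 then (3 : Int) else x)).sum + my_list.length - 1 ≤ 52
instance (my_list : List Int) : Decidable (Pre_compute_mid_result my_list) := by
  unfold Pre_compute_mid_result; infer_instance

def pvWitness_compute_mid_result : List Int := [1, 2, 4]

def Spec_compute_mid_result (my_list : List Int) (out : List String) : Prop :=
  out = compute_mid_result_alt my_list
instance (my_list : List Int) (out : List String) : Decidable (Spec_compute_mid_result my_list out) := by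
  unfold Spec_compute_mid_result; infer_instance

-- ===== CLAIM (what is proved, stated in full; the proofs are below) =====
def Claim_equal_compute_mid_result : Prop :=
  ∀ (my_list : List Int), Dom_compute_mid_result my_list →
    Pre_compute_mid_result my_list →
    Spec_compute_mid_result my_list (compute_mid_result my_list)

-- ===== LEMMAS AND PROOFS =====

-- the letters of one segment: n consecutive alphabet entries starting at offset j
def seg (j n : Nat) : List String :=
  (List.range n).map (fun t => base_data.getD (j + t) "")

-- the intended picture: segments separated by single "&"s, offsets advancing by v+1
def mid : List Nat → Nat → List String
  | [], _ => []
  | [n], j => seg j n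
  | n :: m :: rest, j => seg j n ++ "&" :: mid (m :: rest) (j + n + 1)

-- A's overwrite loop, structurally: set position s+n to "&", continue at s+n+1
def ov : List String → List Nat → Nat → List String
  | L, [], _ => L
  | L, n :: rest, s => ov (L.set (s + n) "&") rest (s + n + 1)

theorem seg_succ (j n : Nat) : seg j (n + 1) = seg j n ++ [base_data.getD (j + n) ""] := by
  simp [seg, List.range_succ]

theorem seg_add (j n m : Nat) : seg j (n + m) = seg j n ++ seg (j + n) m := by
  simp only [seg, List.range_add, List.map_append, List.map_map]
  congr 1
  apply List.map_congr_left
  intro t _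
  simp [Function.comp, Nat.add_assoc]

theorem seg_one_add (j m : Nat) :
    seg j (1 + m) = base_data.getD j "" :: seg (j + 1) m := by
  rw [seg_add]
  simp [seg]

theorem length_seg (j n : Nat) : (seg j n).length = n := by simp [seg]

theorem ov_append (ks : List Nat) (P Q : List String) (s : Nat) :
    ov (P ++ Q) ks (P.length + s) = P ++ ov Q ks s := by
  induction ks generalizing Q s with
  | nil => rfl
  | cons n rest ih =>
      show ov ((P ++ Q).set (P.length + s + n) "&") rest (P.length + s + n + 1)
        = P ++ ov (Q.set (s + n) "&") rest (s + n + 1)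
      rw [List.set_append_right _ _ (by omega)]
      have h1 : P.length + s + n - P.length = s + n := by omega
      have h2 : P.length + s + n + 1 = P.length + (s + n + 1) := by omega
      rw [h1, h2, ih]

theorem keyA (ns : List Nat) : ∀ (j : Nat), ns ≠ [] →
    ov (seg j (ns.sum + ns.length - 1)) ns.dropLast 0 = mid ns j := by
  induction ns with
  | nil => intro j h; exact absurd rfl h
  | cons n rest ih =>
      intro j _
      cases rest with
      | nil => simp [mid, ov]
      | cons m rest' =>
          have hT : (n :: m :: rest').sum + (n :: m :: rest').length - 1
              = n + (1 + ((m :: rest').sum + (m :: rest').length - 1)) := by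
            simp only [List.sum_cons, List.length_cons]
            omega
          rw [hT, seg_add, seg_one_add]
          rw [show (n :: m :: rest').dropLast = n :: (m :: rest').dropLast from by simp]
          show ov (List.set (seg j n ++ base_data.getD (j + n) "" ::
              seg (j + n + 1) ((m :: rest').sum + (m :: rest').length - 1)) (0 + n) "&")
            (m :: rest').dropLast (0 + n + 1) = _
          rw [List.set_append_right _ _ (by simp [length_seg]),
            length_seg, Nat.zero_add, Nat.sub_self, List.set_cons_zero, List.append_cons]
          rw [show n + 1 = (seg j n ++ ["&"]).length + 0 from by simp [length_seg]]
          rw [ov_append, ih (j + n + 1) (by simp)]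
          simp [mid]

-- A's overwrite fold (Int state, cons head untouched) is ov on the tail
theorem ovA (ks : List Int) : ∀ (L : List String) (x : String) (s : Nat),
    (∀ v ∈ ks, 0 ≤ v) →
    (ks.foldl (fun (p : List String × Int) v =>
        (PySem.List.pySetD p.1 (p.2 + v + 1) "&", p.2 + v + 1)) (x :: L, (s : Int)))
      = (x :: ov L (ks.map Int.toNat) s,
          ((s + (ks.map Int.toNat).sum + ks.length : Nat) : Int)) := by
  induction ks with
  | nil => intro L x s _; simp [ov]
  | cons v rest ih =>
      intro L x s hk
      have hv : 0 ≤ v := hk v (by simp)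
      have hrest : ∀ w ∈ rest, 0 ≤ w := fun w hw => hk w (by simp [hw])
      have hcast : (s : Int) + v + 1 = ((s + v.toNat + 1 : Nat) : Int) := by
        push_cast; omega
      simp only [List.foldl_cons]
      rw [hcast, PySem.List.pySetD_natCast]
      rw [show (x :: L).set (s + v.toNat + 1) "&" = x :: L.set (s + v.toNat) "&" from
        List.set_cons_succ ..]
      rw [ih (L.set (s + v.toNat) "&") x (s + v.toNat + 1) hrest, Prod.mk.injEq]
      refine ⟨?_, ?_⟩
      · simp only [List.map_cons]
        rfl
      · simp only [List.map_cons, List.sum_cons, List.length_cons]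
        omega

-- B's inner letter loop
theorem innerB (n : Nat) (res : List String) (j : Nat) :
    (PySem.List.pyRange 0 (n : Int) 1).foldl
      (fun (w : List String × Int) _ =>
        (w.1 ++ [PySem.List.pyGetD base_data w.2 ""], w.2 + 1)) (res, (j : Int))
    = (res ++ seg j n, ((j + n : Nat) : Int)) := by
  induction n generalizing res j with
  | zero => simp [seg]
  | succ k ih =>
      have hc : ((k + 1 : Nat) : Int) = (k : Int) + 1 := by push_cast; ring
      rw [hc, PySem.List.pyRange_one_succ_right (by positivity), List.foldl_append, ih]
      simp only [List.foldl_cons, List.foldl_nil]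
      rw [seg_succ, Prod.mk.injEq]
      refine ⟨?_, ?_⟩
      · rw [PySem.List.pyGetD_natCast]
        simp [List.append_assoc, List.getD]
      · push_cast; ring

-- B's whole computation on a nonempty list of nonneg values is mid appended to the accumulator
theorem keyB (ns : List Int) (hne : ns ≠ []) (hk : ∀ v ∈ ns, 0 ≤ v) (res : List String) (j : Nat) :
    ((PySem.List.pyRange 0 (PySem.List.pyGetD ns (-1) 0) 1).foldl
      (fun (w : List String × Int) _ =>
        (w.1 ++ [PySem.List.pyGetD base_data w.2 ""], w.2 + 1))
      (ns.dropLast.foldl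
        (fun (q : List String × Int) v =>
          let r :=
            (PySem.List.pyRange 0 v 1).foldl
              (fun (w : List String × Int) _ =>
                (w.1 ++ [PySem.List.pyGetD base_data w.2 ""], w.2 + 1)) q
          (r.1 ++ ["&"], r.2 + 1))
        (res, (j : Int)))).1
    = res ++ mid (ns.map Int.toNat) j := by
  induction ns generalizing res j with
  | nil => exact absurd rfl hne
  | cons n rest ih =>
      cases rest with
      | nil =>
          have hn : 0 ≤ n := hk n (by simp)
          have hg1 : PySem.List.pyGetD [n] (-1) (0 : Int) = n := by simp [pysem]
          rw [show ([n] : List Int).dropLast = [] from by simp]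
          simp only [List.foldl_nil]
          rw [hg1]
          conv_lhs => rw [show n = ((n.toNat : Nat) : Int) from by omega, innerB]
          simp [mid]
      | cons m rest' =>
          have hn : 0 ≤ n := hk n (by simp)
          have hrest : ∀ w ∈ (m :: rest'), 0 ≤ w := fun w hw => hk w (by simp [hw])
          have hg : PySem.List.pyGetD (n :: m :: rest') (-1) (0 : Int)
              = PySem.List.pyGetD (m :: rest') (-1) (0 : Int) := by
            simp [pysem]
          rw [show (n :: m :: rest').dropLast = n :: (m :: rest').dropLast from by simp]
          simp only [List.foldl_cons]
          rw [hg]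
          have hn' : n = ((n.toNat : Nat) : Int) := by omega
          conv_lhs => rw [hn', innerB]
          dsimp only
          rw [show ((j + n.toNat : Nat) : Int) + 1 = ((j + n.toNat + 1 : Nat) : Int) from by
            push_cast; ring]
          rw [ih (by simp) hrest]
          rw [show mid ((n :: m :: rest').map Int.toNat) j
              = seg j n.toNat ++ "&" :: mid ((m :: rest').map Int.toNat) (j + n.toNat + 1) from by
            simp [mid]]
          simp [List.append_assoc]

-- sums of nonneg Int lists cast from their toNat images
theorem sum_toNat (ks : List Int) (hk : ∀ v ∈ ks, 0 ≤ v) :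
    ks.sum = ((ks.map Int.toNat).sum : Int) := by
  induction ks with
  | nil => simp
  | cons v rest ih =>
      have hv : 0 ≤ v := hk v (by simp)
      have hr := ih (fun w hw => hk w (by simp [hw]))
      rw [List.sum_cons, List.map_cons, List.sum_cons, hr]
      omega

-- A's source-building loop yields seg 0
theorem sourceA (t : Nat) :
    (PySem.List.pyRange 0 (t : Int) 1).foldl
      (fun s i => s ++ [PySem.List.pyGetD base_data i ""]) ([] : List String)
    = seg 0 t := by
  rw [PySem.List.foldl_append_singleton_eq_map]
  rw [PySem.List.pyRange_one]
  simp [seg, List.map_map, Function.comp]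

-- ===== VERDICT (by name: the statement is the Claim_ definition above) =====
theorem compute_mid_result_spec : Claim_equal_compute_mid_result := by
  intro my_list _ hpre
  obtain ⟨hnn, -⟩ := hpre
  unfold Spec_compute_mid_result
  by_cases hemp : my_list = []
  · subst hemp; decide
  · set vals := my_list.map (fun x => if x = 2 then (3 : Int) else x) with hvals
    have hvne : vals ≠ [] := by
      rw [hvals]; simpa [List.map_eq_nil_iff] using hemp
    have hvnn : ∀ v ∈ vals, 0 ≤ v := by
      intro v hv
      rw [hvals] at hv
      simp only [List.mem_map] at hv
      obtain ⟨x, hx, rfl⟩ := hv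
      have := hnn x hx
      split_ifs <;> omega
    set ns := vals.map Int.toNat with hns
    have hnsne : ns ≠ [] := by rw [hns]; simpa [List.map_eq_nil_iff] using hvne
    have hB : compute_mid_result_alt my_list = ["s"] ++ mid ns 0 := by
      unfold compute_mid_result_alt
      dsimp only
      rw [← hvals, if_neg hvne]
      have hsl : PySem.List.slice vals none (some (-1)) = vals.dropLast := by
        simp [pysem]
      rw [hsl]
      exact keyB vals hvne hvnn ["s"] 0
    have hlen1 : 1 ≤ vals.length := List.length_pos_of_ne_nil hvne
    have hlenns : ns.length = vals.length := by rw [hns]; simp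
    have hsum := sum_toNat vals hvnn
    have hA : compute_mid_result my_list
        = "s" :: ov (seg 0 (ns.sum + ns.length - 1)) ns.dropLast 0 := by
      unfold compute_mid_result
      dsimp only
      rw [← hvals]
      have htot : vals.sum + (vals.length : Int) - 1
          = ((ns.sum + ns.length - 1 : Nat) : Int) := by
        rw [hsum, ← hns]
        omega
      rw [htot, sourceA]
      have hb : (vals.length : Int) - 1 = ((vals.dropLast.length : Nat) : Int) := by
        rw [List.length_dropLast]
        omega
      rw [hb]
      have hstep :
          (PySem.List.pyRange 0 ((vals.dropLast.length : Nat) : Int) 1).foldl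
            (fun (p : List String × Int) i =>
              (PySem.List.pySetD p.1 (p.2 + PySem.List.pyGetD vals i 0 + 1) "&",
                p.2 + PySem.List.pyGetD vals i 0 + 1))
            ("&" :: seg 0 (ns.sum + ns.length - 1), 0)
          = (PySem.List.pyRange 0 ((vals.dropLast.length : Nat) : Int) 1).foldl
            (fun (p : List String × Int) i =>
              (PySem.List.pySetD p.1 (p.2 + PySem.List.pyGetD vals.dropLast i 0 + 1) "&",
                p.2 + PySem.List.pyGetD vals.dropLast i 0 + 1))
            ("&" :: seg 0 (ns.sum + ns.length - 1), 0) := by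
        apply PySem.List.foldl_congr_mem
        intro acc i hi
        rw [PySem.List.mem_pyRange_one] at hi
        have hdl : vals.dropLast.length = vals.length - 1 := List.length_dropLast
        have h1 : PySem.List.pyGetD vals i 0 = PySem.List.pyGetD vals.dropLast i 0 := by
          rw [PySem.List.pyGetD_of_nonneg vals 0 hi.1, PySem.List.pyGetD_of_nonneg vals.dropLast 0 hi.1]
          have hlt2 : i.toNat < vals.dropLast.length := by omega
          rw [List.getD_eq_getElem _ _ (by omega), List.getD_eq_getElem _ _ hlt2]
          simp [List.getElem_dropLast]
        rw [h1]
      rw [hstep]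
      have hfold :
          (PySem.List.pyRange 0 ((vals.dropLast.length : Nat) : Int) 1).foldl
            (fun (p : List String × Int) i =>
              (PySem.List.pySetD p.1 (p.2 + PySem.List.pyGetD vals.dropLast i 0 + 1) "&",
                p.2 + PySem.List.pyGetD vals.dropLast i 0 + 1))
            ("&" :: seg 0 (ns.sum + ns.length - 1), 0)
          = vals.dropLast.foldl
            (fun (p : List String × Int) v =>
              (PySem.List.pySetD p.1 (p.2 + v + 1) "&", p.2 + v + 1))
            ("&" :: seg 0 (ns.sum + ns.length - 1), 0) :=
        PySem.List.foldl_pyRange_zero_pyGetD' vals.dropLast 0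
          (fun (p : List String × Int) v =>
            (PySem.List.pySetD p.1 (p.2 + v + 1) "&", p.2 + v + 1))
          ("&" :: seg 0 (ns.sum + ns.length - 1), 0)
      rw [hfold]
      rw [show (0 : Int) = ((0 : Nat) : Int) from rfl]
      rw [ovA vals.dropLast (seg 0 (ns.sum + ns.length - 1)) "&" 0
        (fun v hv => hvnn v (List.mem_of_mem_dropLast hv))]
      rw [show vals.dropLast.map Int.toNat = ns.dropLast from by
        rw [hns, List.map_dropLast]]
      rw [PySem.List.pySetD_natCast]
      rfl
    rw [hA, hB, keyA ns 0 hnsne]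
    rfl
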